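-- pv_equiv track=rewrite | github.com/any020/INFO132 | any020_5_2.py | funksjon3
-- ===== SOURCE A (Python) =====
-- def funksjon3(minListe):
--     count = 0
--     x = 0
--
--     for number in minListe:
--         if number == 0:
--             x = x + 1
--             if x == 2:
--                 break
--
--         elif number<0 or number % 2 == 1:
--             count = count + 1
--
--     return count
-- ===== SOURCE B (Python) =====
-- def funksjon3(minListe):
--     # Pass 1: find the index of the second zero (end of the counted prefix).
--     end = len(minListe)
--     zeros = 0
--     for i, n in enumerate(minListe):
--         if n == 0:
--             zeros += 1
--             if zeros == 2:
--                 end = i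
--                 break
--     # Pass 2: count negatives/odds in that prefix.
--     return sum(1 for n in minListe[:end] if n < 0 or n % 2 == 1)
-- ===== Notes on version B (the rewrite author's own statement) =====
-- stated objective: alternative
-- what changed: Splits A's single fused loop with two accumulators into two passes: first locate the index of the second zero, then count negatives/odds over that prefix slice.
import Mathlib
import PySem

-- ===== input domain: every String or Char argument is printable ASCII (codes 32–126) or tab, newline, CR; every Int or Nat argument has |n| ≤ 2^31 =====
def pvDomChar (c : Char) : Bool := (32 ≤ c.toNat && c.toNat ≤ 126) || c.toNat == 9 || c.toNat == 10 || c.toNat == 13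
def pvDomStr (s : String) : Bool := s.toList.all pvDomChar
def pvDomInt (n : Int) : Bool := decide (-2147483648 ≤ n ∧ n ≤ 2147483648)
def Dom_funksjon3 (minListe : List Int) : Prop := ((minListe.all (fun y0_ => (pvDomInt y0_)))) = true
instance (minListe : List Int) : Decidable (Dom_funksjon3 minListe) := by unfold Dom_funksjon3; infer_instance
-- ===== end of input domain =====

-- B replaces A's single fused loop (two accumulators, break on the second zero) by two passes:
-- first locate the index of the second zero, then count negatives/odds over that prefix (alternative decomposition).

-- ===== PORT A =====
-- A's for-loop: state (count, x); break when x reaches 2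
def funksjon3Go : List Int → Int → Int → Int
  | [], count, _ => count
  | n :: rest, count, x =>
    if n = 0 then
      if x + 1 = 2 then count else funksjon3Go rest count (x + 1)
    else if n < 0 ∨ PySem.Int.mod n 2 = 1 then funksjon3Go rest (count + 1) x
    else funksjon3Go rest count x

def funksjon3 (minListe : List Int) : Int := funksjon3Go minListe 0 0

-- ===== PORT B =====
-- pass 1 of B: the enumerate-loop looking for the second zero (none = fewer than two zeros)
def funksjon3AltFind : List Int → Nat → Nat → Option Nat
  | [], _, _ => none
  | n :: rest, i, zeros =>
    if n = 0 then
      if zeros + 1 = 2 then some i else funksjon3AltFind rest (i + 1) (zeros + 1)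
    else funksjon3AltFind rest (i + 1) zeros

def funksjon3AltPred (n : Int) : Bool := n < 0 || PySem.Int.mod n 2 = 1

def funksjon3_alt (minListe : List Int) : Int :=
  let e : Nat := (funksjon3AltFind minListe 0 0).getD minListe.length
  -- pass 2 of B: sum(1 for n in minListe[:end] if n < 0 or n % 2 == 1)
  (PySem.List.slice minListe none (some (e : Int))).foldl
    (fun acc n => if funksjon3AltPred n then acc + 1 else acc) 0

-- ===== PRECONDITION & SPEC =====
def Spec_funksjon3 (minListe : List Int) (out : Int) : Prop := out = funksjon3_alt minListe
instance (minListe : List Int) (out : Int) : Decidable (Spec_funksjon3 minListe out) := by unfold Spec_funksjon3; infer_instance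

-- ===== CLAIM (what is proved, stated in full; the proofs are below) =====
def Claim_equal_funksjon3 : Prop := ∀ (minListe : List Int), Dom_funksjon3 minListe → Spec_funksjon3 minListe (funksjon3 minListe)

-- ===== LEMMAS AND PROOFS =====

-- common reference value: k = number of zeros still allowed before the break (k ∈ {1, 2})
def funksjon3Ref : List Int → Nat → Int
  | [], _ => 0
  | n :: rest, k =>
    if n = 0 then (if k = 1 then 0 else funksjon3Ref rest (k - 1))
    else (if funksjon3AltPred n then 1 else 0) + funksjon3Ref rest k

theorem funksjon3Go_eq_ref (l : List Int) :
    ∀ c x : Int, x = 0 ∨ x = 1 → funksjon3Go l c x = c + funksjon3Ref l (2 - x.toNat) := by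
  induction l with
  | nil => intro c x _; simp [funksjon3Go, funksjon3Ref]
  | cons n rest ih =>
    intro c x hx
    by_cases h0 : n = 0
    · rcases hx with hx | hx <;> subst hx
      · simpa [funksjon3Go, funksjon3Ref, h0] using ih c 1 (Or.inr rfl)
      · simp [funksjon3Go, funksjon3Ref, h0]
    · by_cases hp : n < 0 ∨ PySem.Int.mod n 2 = 1
      · have hp' : funksjon3AltPred n = true := by
          simp only [funksjon3AltPred, Bool.or_eq_true, decide_eq_true_eq]; exact hp
        simp only [funksjon3Go, funksjon3Ref, h0, if_false, if_pos hp, hp', if_true, ite_false]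
        rw [ih (c + 1) x hx]; ring
      · have hp' : funksjon3AltPred n = false := by
          simp only [funksjon3AltPred, Bool.or_eq_false_iff, decide_eq_false_iff_not]
          push_neg at hp
          exact ⟨by omega, hp.2⟩
        simp only [funksjon3Go, funksjon3Ref, h0, if_false, if_neg hp, hp', Bool.false_eq_true]
        rw [ih c x hx]; simp

-- the find loop only shifts its index argument
theorem funksjon3AltFind_shift (l : List Int) :
    ∀ i z : Nat, funksjon3AltFind l i z = (funksjon3AltFind l 0 z).map (· + i) := by
  induction l with
  | nil => intro i z; simp [funksjon3AltFind]
  | cons n rest ih =>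
    intro i z
    by_cases h0 : n = 0
    · by_cases hz : z + 1 = 2
      · simp [funksjon3AltFind, h0, hz]
      · simp only [funksjon3AltFind, h0, hz, if_true, if_false, ite_false, ite_true]
        rw [ih (i + 1), ih 1]
        cases funksjon3AltFind rest 0 (z + 1) <;> simp <;> omega
    · simp only [funksjon3AltFind, h0, if_false, ite_false]
      rw [ih (i + 1), ih 1]
      cases funksjon3AltFind rest 0 z <;> simp <;> omega

theorem funksjon3_getD_shift (o : Option Nat) (m : Nat) :
    (o.map (· + 1)).getD (m + 1) = o.getD m + 1 := by
  cases o <;> simp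

def funksjon3Cnt (l : List Int) : Int :=
  l.foldl (fun acc n => if funksjon3AltPred n then acc + 1 else acc) 0

theorem funksjon3Cnt_acc (l : List Int) :
    ∀ a : Int, l.foldl (fun acc n => if funksjon3AltPred n then acc + 1 else acc) a
      = a + funksjon3Cnt l := by
  induction l with
  | nil => intro a; simp [funksjon3Cnt]
  | cons m rest ih =>
    intro a
    simp only [funksjon3Cnt, List.foldl_cons]
    rw [ih, ih (if funksjon3AltPred m then (0:Int) + 1 else 0)]
    split_ifs <;> ring

theorem funksjon3Cnt_cons (n : Int) (l : List Int) :
    funksjon3Cnt (n :: l) = (if funksjon3AltPred n then 1 else 0) + funksjon3Cnt l := by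
  simp only [funksjon3Cnt, List.foldl_cons]
  rw [funksjon3Cnt_acc]
  simp only [funksjon3Cnt]
  split_ifs <;> ring

theorem funksjon3_take_eq_ref (l : List Int) :
    ∀ z : Nat, z = 0 ∨ z = 1 →
      funksjon3Cnt (l.take ((funksjon3AltFind l 0 z).getD l.length)) = funksjon3Ref l (2 - z) := by
  induction l with
  | nil => intro z _; simp [funksjon3AltFind, funksjon3Ref, funksjon3Cnt]
  | cons n rest ih =>
    intro z hz
    by_cases h0 : n = 0
    · rcases hz with hz | hz <;> subst hz
      · have hn : funksjon3AltPred n = false := by simp [funksjon3AltPred, h0]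
        have hfind : funksjon3AltFind (n :: rest) 0 0
            = (funksjon3AltFind rest 0 1).map (· + 1) := by
          simp [funksjon3AltFind, h0, funksjon3AltFind_shift rest 1 1]
        rw [hfind, List.length_cons, funksjon3_getD_shift, List.take_succ_cons,
          funksjon3Cnt_cons, hn, ih 1 (Or.inr rfl)]
        simp [funksjon3Ref, h0]
      · simp [funksjon3AltFind, h0, funksjon3Ref, funksjon3Cnt]
    · have hfind : funksjon3AltFind (n :: rest) 0 z
          = (funksjon3AltFind rest 0 z).map (· + 1) := by
        simp [funksjon3AltFind, h0, funksjon3AltFind_shift rest 1 z]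
      rw [hfind, List.length_cons, funksjon3_getD_shift, List.take_succ_cons,
        funksjon3Cnt_cons, ih z hz]
      simp [funksjon3Ref, h0]

-- ===== VERDICT (by name: the statement is the Claim_ definition above) =====
theorem funksjon3_spec : Claim_equal_funksjon3 := by
  intro l _
  unfold Spec_funksjon3 funksjon3 funksjon3_alt
  rw [funksjon3Go_eq_ref l 0 0 (Or.inl rfl)]
  simp only [PySem.List.slice_to_natCast, Int.toNat_zero, zero_add]
  rw [← funksjon3_take_eq_ref l 0 (Or.inl rfl)]
  rfl
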